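-- pv_equiv track=rewrite | github.com/ZeweiXu0219/disaster_Prediction | Preprocessing/preprocessing.py | get_special_tag
-- ===== SOURCE A (Python) =====
-- def get_special_tag(texts, tag):
--     """
--     get special tag of tweet texts like '@name' '#title'
--
--     Args:
--         texts (str): tweets
--         tag (str): tag
--     """
--     all_tags = []
--     for sentence in texts:
--         tk_list = str(sentence).split()
--         for tk in tk_list:
--             if tk.startswith(tag) and tk not in all_tags:
--                 all_tags.append(tk)
--     return all_tags
-- ===== SOURCE B (Python) =====
-- def get_special_tag(texts, tag):
--     # pass 1: flat list of all matching tokens (duplicates included)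
--     toks = [tk for sentence in texts
--             for tk in str(sentence).split()
--             if tk.startswith(tag)]
--     # pass 2: emit the head, then delete every later copy of it before continuing
--     out = []
--     while toks:
--         head = toks[0]
--         out.append(head)
--         toks = [t for t in toks[1:] if t != head]
--     return out
-- ===== Notes on version B (the rewrite author's own statement) =====
-- stated objective: alternative
-- what changed: A interleaves filtering and dedup in one nested loop with a 'not in all_tags' membership scan per token; B first collects the flat list of all matching tokens, then deduplicates with a different mechanism: repeatedly emit the head and FILTER OUT all its later copies from the remaining list, so no accumulator membership test exists at all.
import Mathlib
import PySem

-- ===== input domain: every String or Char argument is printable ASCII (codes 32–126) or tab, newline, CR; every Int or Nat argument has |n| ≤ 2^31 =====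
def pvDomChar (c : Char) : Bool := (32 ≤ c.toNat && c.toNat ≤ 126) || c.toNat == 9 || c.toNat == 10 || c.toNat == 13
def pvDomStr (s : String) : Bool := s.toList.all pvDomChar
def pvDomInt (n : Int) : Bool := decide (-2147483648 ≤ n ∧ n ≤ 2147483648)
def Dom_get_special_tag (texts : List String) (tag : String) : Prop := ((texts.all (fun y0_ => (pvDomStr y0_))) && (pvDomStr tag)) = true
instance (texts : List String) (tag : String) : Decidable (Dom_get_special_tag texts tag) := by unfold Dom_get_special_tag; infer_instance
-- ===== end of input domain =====

-- B splits A's interleaved filter-and-dedup loop into a flat collection pass plus a dedup that repeatedly emits the head and filters its later copies out of the remainder (no accumulator membership test); alternative decomposition, similar cost.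


-- ===== PORT A =====
-- A: loop over sentences, inner loop over tokens, appending when startswith and not already collected.
def get_special_tag (texts : List String) (tag : String) : List String :=
  texts.foldl (fun all_tags sentence =>
    (PySem.Str.split₀ sentence).foldl (fun acc tk =>
      if PySem.Str.startswith tk tag && !(acc.contains tk) then acc ++ [tk] else acc) all_tags) []

-- ===== PORT B =====
-- B's while loop: emit the head, filter every later copy of it out of the remainder, repeat.
def pvStrip : List String → List String
  | [] => []
  | head :: rest => head :: pvStrip (rest.filter (fun t => t != head))
termination_by l => l.length
decreasing_by
  simpa using List.length_filter_le (fun x => x != head) rest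

-- B: collect all matching tokens in one flat pass, then the strip loop.
def get_special_tag_alt (texts : List String) (tag : String) : List String :=
  pvStrip ((texts.flatMap (fun sentence => PySem.Str.split₀ sentence)).filter
    (fun tk => PySem.Str.startswith tk tag))

-- ===== PRECONDITION & SPEC =====
def Spec_get_special_tag (texts : List String) (tag : String) (out : List String) : Prop := out = get_special_tag_alt texts tag
instance (texts : List String) (tag : String) (out : List String) : Decidable (Spec_get_special_tag texts tag out) := by unfold Spec_get_special_tag; infer_instance

-- ===== CLAIM (what is proved, stated in full; the proofs are below) =====
def Claim_equal_get_special_tag : Prop := ∀ (texts : List String) (tag : String), Dom_get_special_tag texts tag → Spec_get_special_tag texts tag (get_special_tag texts tag)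

-- ===== LEMMAS AND PROOFS =====

-- A's inner step on one token list equals folding Set.add over the filtered tokens.
theorem inner_fold_eq_filter_add (p : String → Bool) (toks : List String) (acc : List String) :
    toks.foldl (fun a tk => if p tk && !(a.contains tk) then a ++ [tk] else a) acc
      = (toks.filter p).foldl PySem.Set.add acc := by
  induction toks generalizing acc with
  | nil => rfl
  | cons t ts ih =>
    simp only [List.foldl_cons, List.filter_cons]
    by_cases hp : p t
    · have h1 : (if p t && !(acc.contains t) then acc ++ [t] else acc) = PySem.Set.add acc t := by
        by_cases hm : t ∈ acc <;> simp [PySem.Set.add, hp, hm]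
      rw [h1, hp]
      exact ih _
    · rw [if_neg hp]
      have h2 : (if p t && !(acc.contains t) then acc ++ [t] else acc) = acc := by
        simp [hp]
      rw [h2]
      exact ih acc

-- A's whole fold from any accumulator equals folding Set.add over the filtered flat token list.
theorem outer_fold_eq (tag : String) (ts : List String) (acc : List String) :
    ts.foldl (fun all_tags sentence =>
      (PySem.Str.split₀ sentence).foldl
        (fun a tk => if PySem.Str.startswith tk tag && !(a.contains tk) then a ++ [tk] else a)
        all_tags) acc
    = ((ts.flatMap (fun sentence => PySem.Str.split₀ sentence)).filter
        (fun tk => PySem.Str.startswith tk tag)).foldl PySem.Set.add acc := by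
  induction ts generalizing acc with
  | nil => rfl
  | cons u us ihu =>
    simp only [List.foldl_cons, List.flatMap_cons, List.filter_append, List.foldl_append]
    rw [inner_fold_eq_filter_add, ihu]

-- The Set.add fold from any accumulator is the accumulator followed by the strip loop
-- on the tokens not already in it.
theorem foldl_add_eq_strip (l acc : List String) :
    l.foldl PySem.Set.add acc = acc ++ pvStrip (l.filter (fun x => !acc.contains x)) := by
  induction l generalizing acc with
  | nil => rw [pvStrip.eq_def]; simp
  | cons h t ih =>
    simp only [List.foldl_cons, List.filter_cons]
    by_cases hm : h ∈ acc
    · have ha : PySem.Set.add acc h = acc := by simp [PySem.Set.add, hm]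
      rw [ha, ih acc]
      simp [hm]
    · have ha : PySem.Set.add acc h = acc ++ [h] := by simp [PySem.Set.add, hm]
      rw [ha, ih (acc ++ [h])]
      have hfb : (!acc.contains h) = true := by simp [hm]
      rw [hfb, if_pos rfl, pvStrip]
      have hf : (List.filter (fun x => !acc.contains x) t).filter (fun a => a != h)
              = t.filter (fun x => !(acc ++ [h]).contains x) := by
        rw [List.filter_filter]
        apply List.filter_congr
        intro x _
        by_cases hx : x = h <;> simp [hx, hm]
      rw [hf]
      simp

theorem get_special_tag_eq (texts : List String) (tag : String) :
    get_special_tag texts tag = get_special_tag_alt texts tag := by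
  unfold get_special_tag get_special_tag_alt
  rw [outer_fold_eq, foldl_add_eq_strip]
  simp

-- ===== VERDICT (by name: the statement is the Claim_ definition above) =====
theorem get_special_tag_spec : Claim_equal_get_special_tag := by
  intro texts tag _
  unfold Spec_get_special_tag
  exact get_special_tag_eq texts tag
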